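/- GENERATED by farm/mkstatement.py from design/units.tsv (unit `DGifOpen.E`) and the assertions of Gif/Spec/Seg_DGifOpen.lean — do not edit.
   THE STATEMENT of the proof unit `DGifOpen.E`: segment E of `DGifOpen` (10 instructions; entries 0x108816;
   exits ret; ranges 0x108816-0x108834)
   takes each of its entry assertions to one of its exit assertions (`Gif.Spec.DGifOpen.SegE`), given the contracts of its callees.
   What the names mean: ProgX/Base/Spec/Basic.lean (the shared hypotheses), Gif/Spec/Seg_DGifOpen.lean (the assertions). The theorem to prove:
   `theorem DGifOpen_E_ok : Gif.Spec.DGifOpen_E.Statement`. -/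
import Gif.Code
import Gif.Dec.All
import Gif.Labels
import Gif.Spec.Seg_DGifOpen
namespace Gif.Spec.DGifOpen_E
open X86 X86.User Asan

/-- The statement of unit `DGifOpen.E`. -/
def Statement : Prop :=
  ∀ (Lay : Layout) (_hLay : Lay.hi = 0x1000000) (μ : Microarch) (_hμ : UserX.MicroOK μ) (u₀ : State)
    (_hcode : HasCodeNat Lay u₀ Gif.L.DGifOpen.entry Gif.Code.code_DGifOpen.nat Gif.L.DGifOpen.size),
    Gif.Spec.DGifOpen.SegE Lay μ u₀

end Gif.Spec.DGifOpen_E
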